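-- pv_equiv track=rewrite | github.com/steinunnfridriks/NERBiasIce | sample_sentences.py | b_not_followed_by_i
-- ===== SOURCE A (Python) =====
-- def b_not_followed_by_i(sent, b_tag, i_tag):
--     """
--     Return True if any B-tag in the sentence is NOT directly followed by the corresponding I-tag.
--     """
--     for idx, line in enumerate(sent):
--         if '\t' in line:
--             word, tag = line.split('\t')
--             if tag == b_tag:
--                 # If last token, can't be followed by I
--                 if idx == len(sent) - 1:
--                     return True
--                 next_line = sent[idx + 1]
--                 if '\t' in next_line:
--                     _, next_tag = next_line.split('\t')
--                     if next_tag != i_tag: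
--                         return True
--     return False
-- ===== SOURCE B (Python) =====
-- def b_not_followed_by_i(sent, b_tag, i_tag):
--     """
--     Return True if any B-tag in the sentence is NOT directly followed by the corresponding I-tag.
--     Single forward pass with an `expect_i` flag instead of index lookahead.
--     """
--     expect_i = False
--     for line in sent:
--         if '\t' in line:
--             _, tag = line.split('\t')
--             if expect_i and tag != i_tag:
--                 return True
--             expect_i = tag == b_tag
--         else:
--             expect_i = False
--     return expect_i
-- ===== Notes on version B (the rewrite author's own statement) =====
-- stated objective: simpler
-- what changed: Replaces the enumerate/len()/sent[idx+1] lookahead with a single forward pass carrying a boolean expect_i flag, never indexing or measuring the list.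
-- outside the precondition, e.g. on b_not_followed_by_i(['a\tB', 'c\tX', 'x\ty\tz'], 'B', 'I'): A returns True, B returns True
import Mathlib
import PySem

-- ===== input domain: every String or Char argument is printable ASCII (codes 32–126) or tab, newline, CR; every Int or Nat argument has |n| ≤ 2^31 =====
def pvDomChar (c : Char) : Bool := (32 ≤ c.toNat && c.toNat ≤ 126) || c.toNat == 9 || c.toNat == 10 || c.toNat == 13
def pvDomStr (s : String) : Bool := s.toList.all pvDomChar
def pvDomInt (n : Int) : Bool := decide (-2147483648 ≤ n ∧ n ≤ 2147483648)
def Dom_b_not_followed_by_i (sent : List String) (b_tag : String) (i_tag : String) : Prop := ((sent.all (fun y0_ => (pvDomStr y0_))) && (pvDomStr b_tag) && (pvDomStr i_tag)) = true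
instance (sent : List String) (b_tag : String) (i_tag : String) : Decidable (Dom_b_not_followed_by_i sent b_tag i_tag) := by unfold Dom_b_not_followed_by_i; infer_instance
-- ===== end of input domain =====

-- B replaces A's enumerate/len()/sent[idx+1] lookahead by a single forward pass with an expect_i flag (objective: simpler).


-- ===== PORT A =====
-- 'word, tag = line.split("\t")': exact when the split has exactly 2 parts (Pre_); otherwise
-- Python raises ValueError (excluded by Pre_) and this helper returns a dummy pair.
def pvSplitTab (line : String) : String × String :=
  match PySem.Str.split? line "\t" with
  | some [w, t] => (w, t)
  | _ => ("", "")

def pvALoop (sent : List String) (b_tag : String) (i_tag : String) : List (Int × String) → Bool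
  | [] => false
  | (idx, line) :: rest =>
    if PySem.Str.isIn "\t" line then
      if (pvSplitTab line).2 == b_tag then  -- word, tag = line.split('\t'); tag == b_tag
        if idx == (sent.length : Int) - 1 then true
        else
          match PySem.List.pyGet? sent (idx + 1) with
          | none => false  -- IndexError: unreachable when idx comes from enumerate(sent)
          | some next_line =>
            if PySem.Str.isIn "\t" next_line then
              if (pvSplitTab next_line).2 != i_tag then true else pvALoop sent b_tag i_tag rest
            else pvALoop sent b_tag i_tag rest
      else pvALoop sent b_tag i_tag rest
    else pvALoop sent b_tag i_tag rest

def b_not_followed_by_i (sent : List String) (b_tag : String) (i_tag : String) : Bool :=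
  pvALoop sent b_tag i_tag (PySem.List.enumerate sent)

-- ===== PORT B =====
def pvBLoop (b_tag : String) (i_tag : String) (expect_i : Bool) : List String → Bool
  | [] => expect_i
  | line :: rest =>
    if PySem.Str.isIn "\t" line then
      if expect_i && (pvSplitTab line).2 != i_tag then true
      else pvBLoop b_tag i_tag ((pvSplitTab line).2 == b_tag) rest
    else pvBLoop b_tag i_tag false rest

def b_not_followed_by_i_alt (sent : List String) (b_tag : String) (i_tag : String) : Bool :=
  pvBLoop b_tag i_tag false sent

-- ===== PRECONDITION & SPEC =====
-- Pre_ excludes lines containing a tab whose split('\t') does not have exactly two parts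
-- (i.e. lines with two or more tabs): there Python A's two-name unpacking raises ValueError.
def Pre_b_not_followed_by_i (sent : List String) (b_tag : String) (i_tag : String) : Prop :=
  ∀ line ∈ sent, PySem.Str.isIn "\t" line = true →
    ((PySem.Str.split? line "\t").getD []).length = 2
instance (sent : List String) (b_tag : String) (i_tag : String) : Decidable (Pre_b_not_followed_by_i sent b_tag i_tag) := by unfold Pre_b_not_followed_by_i; infer_instance

def pvWitness_b_not_followed_by_i : List String × String × String :=
  (["a\tB-PER", "b\tO"], "B-PER", "I-PER")

def Spec_b_not_followed_by_i (sent : List String) (b_tag : String) (i_tag : String) (out : Bool) : Prop := out = b_not_followed_by_i_alt sent b_tag i_tag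
instance (sent : List String) (b_tag : String) (i_tag : String) (out : Bool) : Decidable (Spec_b_not_followed_by_i sent b_tag i_tag out) := by unfold Spec_b_not_followed_by_i; infer_instance

-- ===== CLAIM (what is proved, stated in full; the proofs are below) =====
def Claim_equal_b_not_followed_by_i : Prop := ∀ (sent : List String) (b_tag : String) (i_tag : String), Dom_b_not_followed_by_i sent b_tag i_tag → Pre_b_not_followed_by_i sent b_tag i_tag → Spec_b_not_followed_by_i sent b_tag i_tag (b_not_followed_by_i sent b_tag i_tag)

-- ===== LEMMAS AND PROOFS =====

-- Whether A's lookahead from a B-tag fails on the given remainder of the sentence: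
-- an empty remainder (the B-tag was last) fails; otherwise the next line fails iff it
-- carries a tab and its tag differs from i_tag.
def pvNextFails (i_tag : String) : List String → Bool
  | [] => true
  | line :: _ =>
    PySem.Str.isIn "\t" line && ((pvSplitTab line).2 != i_tag)

theorem pvBLoop_true (b_tag i_tag : String) (l : List String) :
    pvBLoop b_tag i_tag true l = (pvNextFails i_tag l || pvBLoop b_tag i_tag false l) := by
  cases l with
  | nil => simp [pvBLoop, pvNextFails]
  | cons line rest =>
    simp only [pvBLoop, pvNextFails]
    cases htab : PySem.Str.isIn "\t" line with
    | false => simp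
    | true =>
      cases hni : ((pvSplitTab line).2 != i_tag) with
      | false => simp
      | true => simp

theorem pvALoop_eq_pvBLoop (sent : List String) (b_tag i_tag : String) :
    ∀ (l : List String) (k : Nat), sent.drop k = l →
      pvALoop sent b_tag i_tag (PySem.List.enumerate l (k : Int)) =
        pvBLoop b_tag i_tag false l := by
  intro l
  induction l with
  | nil => intro k _; simp [PySem.List.enumerate, pvALoop, pvBLoop]
  | cons line rest ih =>
    intro k hk
    have hrest : sent.drop (k + 1) = rest := by
      have := congrArg List.tail hk
      simpa [List.tail_drop] using this
    have hlen : sent.length = k + 1 + rest.length := by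
      have h1 : (sent.drop k).length = sent.length - k := List.length_drop
      rw [hk] at h1
      have h2 : k < sent.length := by
        by_contra h
        rw [not_lt] at h
        have : sent.drop k = [] := List.drop_eq_nil_of_le h
        rw [hk] at this; simp at this
      simp at h1; omega
    have hkcast : (k : Int) + 1 = ((k + 1 : Nat) : Int) := by push_cast; ring
    simp only [PySem.List.enumerate, pvALoop, pvBLoop]
    cases htab : PySem.Str.isIn "\t" line with
    | false =>
      simp only [Bool.false_eq_true, if_false]
      rw [hkcast, ih (k + 1) hrest]
    | true =>
      simp only [if_true, Bool.false_and, Bool.false_eq_true, if_false]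
      cases hb : ((pvSplitTab line).2 == b_tag) with
      | false =>
        simp only [Bool.false_eq_true, if_false]
        rw [hkcast, ih (k + 1) hrest]
      | true =>
        simp only [if_true]
        rw [pvBLoop_true]
        cases rest with
        | nil =>
          have hEq : (k : Int) = (sent.length : Int) - 1 := by
            rw [hlen]; push_cast; simp
          simp [hEq, pvNextFails, pvBLoop]
        | cons next rest' =>
          have hEq : ((k : Int) == (sent.length : Int) - 1) = false := by
            rw [beq_eq_false_iff_ne, hlen]; push_cast; simp; omega
          have hnext : PySem.List.pyGet? sent ((k : Int) + 1) = some next := by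
            rw [hkcast, PySem.List.pyGet?_natCast]
            have h3 : (sent.drop k)[1]? = some next := by rw [hk]; rfl
            rwa [List.getElem?_drop] at h3
          simp only [hEq, Bool.false_eq_true, if_false, hnext]
          cases htab2 : PySem.Str.isIn "\t" next with
          | false =>
            simp only [htab2, Bool.false_eq_true, if_false, pvNextFails, Bool.false_and,
              Bool.false_or]
            rw [hkcast, ih (k + 1) hrest]
          | true =>
            simp only [htab2, if_true, pvNextFails, Bool.true_and]
            cases hni : ((pvSplitTab next).2 != i_tag) with
            | true => simp
            | false =>
              simp only [Bool.false_eq_true, if_false, Bool.false_or]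
              rw [hkcast, ih (k + 1) hrest]

-- ===== VERDICT (by name: the statement is the Claim_ definition above) =====
theorem b_not_followed_by_i_spec : Claim_equal_b_not_followed_by_i := by
  intro sent b_tag i_tag _ _
  unfold Spec_b_not_followed_by_i b_not_followed_by_i b_not_followed_by_i_alt
  exact pvALoop_eq_pvBLoop sent b_tag i_tag sent 0 rfl
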